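-- pv_equiv track=rewrite | github.com/anticol/python_uni_project | 07-exercise/music.py | cluster_peaks
-- ===== SOURCE A (Python) =====
-- def cluster_peaks(peaks):
--     if len(peaks) == 0:
--         return []
--
--     all_cls = []
--     current = []
--
--     for p in peaks:
--         freq, ampl = p
--
--         if (current[-1][0] if len(current) > 0 else None) == freq - 1:
--             current.append((freq, ampl))
--         else:
--             if len(current) > 0:
--                 all_cls.append(max(current, key=lambda tuple: tuple[1]))
--
--             current = [(freq, ampl)]
--
--     if len(current) > 0:
--         all_cls.append(max(current, key=lambda tuple: tuple[1]))
--
--     clusters = list(filter(lambda tuple: tuple[0] != 0, all_cls))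
--     return clusters
-- ===== SOURCE B (Python) =====
-- def cluster_peaks(peaks):
--     # Staged, loop-state-free decomposition: (1) compute the cut positions where
--     # a new run of consecutive (+1) frequencies starts, (2) slice the list into
--     # runs between successive cuts, (3) pick the max-amplitude peak of each run
--     # (first wins on ties), (4) drop picks whose frequency is 0.
--     n = len(peaks)
--     cuts = [i for i in range(n) if i == 0 or peaks[i][0] != peaks[i - 1][0] + 1]
--     runs = [peaks[c:d] for c, d in zip(cuts, cuts[1:] + [n])]
--     picks = [max(run, key=lambda t: t[1]) for run in runs]
--     return [p for p in picks if p[0] != 0]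
-- ===== Notes on version B (the rewrite author's own statement) =====
-- stated objective: alternative
-- what changed: Replaces A's stateful accumulate/flush fold with a loop-state-free staged pipeline: a comprehension computes the cut indices where a new consecutive-frequency run starts, zip of successive cuts slices the list into runs, then max-per-run and the freq-0 filter are separate mapped passes.
import Mathlib
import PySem

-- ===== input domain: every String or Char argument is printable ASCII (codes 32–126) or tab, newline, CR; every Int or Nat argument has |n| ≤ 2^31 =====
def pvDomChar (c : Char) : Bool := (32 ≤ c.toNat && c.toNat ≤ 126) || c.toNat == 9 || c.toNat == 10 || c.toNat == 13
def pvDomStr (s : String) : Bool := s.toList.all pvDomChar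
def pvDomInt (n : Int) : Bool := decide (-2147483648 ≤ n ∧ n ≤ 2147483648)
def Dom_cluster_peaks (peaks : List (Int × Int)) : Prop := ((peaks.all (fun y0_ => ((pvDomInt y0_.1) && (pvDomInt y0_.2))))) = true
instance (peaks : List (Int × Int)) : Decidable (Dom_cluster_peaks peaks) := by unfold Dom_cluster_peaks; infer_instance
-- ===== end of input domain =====

-- B replaces A's stateful accumulate/flush fold by a loop-state-free staged pipeline
-- (cut indices → slices → max per slice → filter); same values everywhere.

-- ===== PORT A =====
-- max(xs, key=lambda t: t[1]) on a nonempty list (first maximal element wins)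
def pymaxAmpl (xs : List (Int × Int)) : Int × Int :=
  (PySem.List.max? xs (fun t => t.2)).getD (0, 0)

-- `(current[-1][0] if len(current) > 0 else None) == freq - 1`: None == int is False
-- in Python, so the branch fires iff current ≠ [] and its last freq is freq - 1 (exact).
def stepA (st : List (Int × Int) × List (Int × Int)) (p : Int × Int) :
    List (Int × Int) × List (Int × Int) :=
  if st.2.length > 0 && ((st.2.getLast?.getD (0, 0)).1 == p.1 - 1) then
    (st.1, st.2 ++ [p])
  else
    ((if st.2.length > 0 then st.1 ++ [pymaxAmpl st.2] else st.1), [p])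

-- the trailing `if len(current) > 0: all_cls.append(max(current, ...))`
def flushA (st : List (Int × Int) × List (Int × Int)) : List (Int × Int) :=
  if st.2.length > 0 then st.1 ++ [pymaxAmpl st.2] else st.1

def cluster_peaks (peaks : List (Int × Int)) : List (Int × Int) :=
  if peaks.length == 0 then []
  else (flushA (peaks.foldl stepA ([], []))).filter (fun t => t.1 != 0)

-- ===== PORT B =====
-- staged pipeline of Source B; peaks[i] / peaks[i-1] via pyGetD (i is always in range:
-- i ∈ range(n) and i ≥ 1 in the second disjunct, so the default is never used)
def cluster_peaks_alt (peaks : List (Int × Int)) : List (Int × Int) :=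
  let n : Int := peaks.length
  let cuts := (PySem.List.pyRange 0 n).filter (fun i =>
    (i == 0) || ((PySem.List.pyGetD peaks i (0, 0)).1 !=
                 (PySem.List.pyGetD peaks (i - 1) (0, 0)).1 + 1))
  let runs := (cuts.zip (PySem.List.slice cuts (some 1) none ++ [n])).map
    (fun cd => PySem.List.slice peaks (some cd.1) (some cd.2))
  let picks := runs.map pymaxAmpl
  picks.filter (fun t => t.1 != 0)

-- ===== PRECONDITION & SPEC =====
def Spec_cluster_peaks (peaks : List (Int × Int)) (out : List (Int × Int)) : Prop := out = cluster_peaks_alt peaks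
instance (peaks : List (Int × Int)) (out : List (Int × Int)) : Decidable (Spec_cluster_peaks peaks out) := by unfold Spec_cluster_peaks; infer_instance

-- ===== CLAIM (what is proved, stated in full; the proofs are below) =====
def Claim_equal_cluster_peaks : Prop := ∀ (peaks : List (Int × Int)), Dom_cluster_peaks peaks → Spec_cluster_peaks peaks (cluster_peaks peaks)

-- ===== LEMMAS AND PROOFS =====

-- the run decomposition both programs compute: pvTakeRun extends a run while the
-- next frequency is last+1; runsOf splits the list into maximal runs
def pvTakeRun (run : List (Int × Int)) (rest : List (Int × Int)) :
    List (Int × Int) × List (Int × Int) :=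
  match rest with
  | [] => (run, [])
  | q :: rest' =>
    if q.1 == (run.getLast?.getD (0, 0)).1 + 1 then pvTakeRun (run ++ [q]) rest'
    else (run, q :: rest')

theorem pvTakeRun_snd_len (run rest : List (Int × Int)) :
    (pvTakeRun run rest).2.length ≤ rest.length := by
  induction rest generalizing run with
  | nil => simp [pvTakeRun]
  | cons q rest' ih =>
    simp only [pvTakeRun]
    split
    · exact le_trans (ih _) (Nat.le_succ _)
    · simp

def runsOf : List (Int × Int) → List (List (Int × Int))
  | [] => []
  | p :: rest => (pvTakeRun [p] rest).1 :: runsOf (pvTakeRun [p] rest).2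
termination_by peaks => peaks.length
decreasing_by
  all_goals simpa using Nat.lt_succ_of_le (pvTakeRun_snd_len [p] rest)

-- B's picks before the filter, in Nat index form
def pvRunBreak (peaks : List (Int × Int)) (k : Nat) : Bool :=
  (k == 0) || ((peaks.getD k (0, 0)).1 != (peaks.getD (k - 1) (0, 0)).1 + 1)

def cutsNat (peaks : List (Int × Int)) : List Nat :=
  (List.range peaks.length).filter (pvRunBreak peaks)

def runsFromCuts (peaks : List (Int × Int)) : List (List (Int × Int)) :=
  ((cutsNat peaks).zip ((cutsNat peaks).tail ++ [peaks.length])).map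
    (fun cd => (peaks.drop cd.1).take (cd.2 - cd.1))

-- pvTakeRun facts
theorem pvTakeRun_append (run rest : List (Int × Int)) :
    (pvTakeRun run rest).1 ++ (pvTakeRun run rest).2 = run ++ rest := by
  induction rest generalizing run with
  | nil => simp [pvTakeRun]
  | cons q rest' ih =>
    simp only [pvTakeRun]
    split
    · rw [ih (run ++ [q])]; simp
    · rfl

theorem pvTakeRun_fst_ne_nil (run rest : List (Int × Int)) (h : run ≠ []) :
    (pvTakeRun run rest).1 ≠ [] := by
  induction rest generalizing run with
  | nil => simp only [pvTakeRun]; exact h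
  | cons q rest' ih =>
    simp only [pvTakeRun]
    split
    · exact ih (run ++ [q]) (by simp)
    · exact h

theorem pvTakeRun_chain (run rest : List (Int × Int)) (h : run ≠ [])
    (hc : List.IsChain (fun a b : Int × Int => b.1 = a.1 + 1) run) :
    List.IsChain (fun a b : Int × Int => b.1 = a.1 + 1) (pvTakeRun run rest).1 := by
  induction rest generalizing run with
  | nil => simp only [pvTakeRun]; exact hc
  | cons q rest' ih =>
    simp only [pvTakeRun]
    split
    · rename_i hq
      refine ih (run ++ [q]) (by simp) ?_
      rw [List.isChain_append]
      refine ⟨hc, by simp, ?_⟩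
      intro x hx y hy
      simp only [List.head?_cons, Option.mem_def, Option.some.injEq] at hy
      subst hy
      have hlast : run.getLast? = some x := hx
      have := beq_iff_eq.mp hq
      rwa [hlast, Option.getD_some] at this
    · exact hc

theorem pvTakeRun_boundary (run rest : List (Int × Int)) (h : run ≠ []) :
    ∀ q ∈ (pvTakeRun run rest).2.head?,
      q.1 ≠ (((pvTakeRun run rest).1.getLast?).getD (0, 0)).1 + 1 := by
  induction rest generalizing run with
  | nil => simp [pvTakeRun]
  | cons q0 rest' ih =>
    simp only [pvTakeRun]
    split
    · exact ih (run ++ [q0]) (by simp)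
    · rename_i hq
      intro q hqmem
      simp only [List.head?_cons, Option.mem_def, Option.some.injEq] at hqmem
      subst hqmem
      exact beq_eq_false_iff_ne.mp (by simpa using hq)

-- cutsNat structure
theorem cutsNat_cons_zero (peaks : List (Int × Int)) (h : peaks ≠ []) :
    ∃ tl, cutsNat peaks = 0 :: tl := by
  obtain ⟨p, rest, rfl⟩ := List.exists_cons_of_ne_nil h
  have : cutsNat (p :: rest) =
      0 :: ((List.range rest.length).map Nat.succ).filter (pvRunBreak (p :: rest)) := by
    simp [cutsNat, List.range_succ_eq_map, pvRunBreak]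
  exact ⟨_, this⟩

theorem cutsNat_split (r rest' : List (Int × Int)) (hr : r ≠ [])
    (hc : List.IsChain (fun a b : Int × Int => b.1 = a.1 + 1) r)
    (hb : ∀ q ∈ rest'.head?, q.1 ≠ ((r.getLast?).getD (0, 0)).1 + 1) :
    cutsNat (r ++ rest') = 0 :: (cutsNat rest').map (fun c => r.length + c) := by
  have hgetD : ∀ (xs : List (Int × Int)) (k : Nat) (hk : k < xs.length),
      xs.getD k (0,0) = xs[k]'hk := by
    intro xs k hk
    simp [List.getD_eq_getElem?_getD, List.getElem?_eq_getElem hk]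
  obtain ⟨m, hm⟩ : ∃ m, r.length = m + 1 :=
    ⟨r.length - 1, by have := List.length_pos_iff.mpr hr; omega⟩
  have hch := List.isChain_iff_getElem.mp hc
  unfold cutsNat
  rw [List.length_append, List.range_add, List.filter_append, List.filter_map]
  have part1 : (List.range r.length).filter (pvRunBreak (r ++ rest')) = [0] := by
    rw [hm, List.range_succ_eq_map, List.filter_cons]
    have h0 : pvRunBreak (r ++ rest') 0 = true := by simp [pvRunBreak]
    rw [if_pos (by simpa using h0), List.filter_map]
    have hnone : (List.range m).filter (pvRunBreak (r ++ rest') ∘ Nat.succ) = [] := by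
      rw [List.filter_congr (q := fun _ => false) ?_, List.filter_false]
      intro j hj
      have hjm : j < m := List.mem_range.mp hj
      have hj1 : j + 1 < r.length := by omega
      have hjr : j < r.length := by omega
      have hj1' : j + 1 < (r ++ rest').length := by simp; omega
      have hjr' : j < (r ++ rest').length := by simp; omega
      simp only [Function.comp_apply, pvRunBreak, Nat.succ_eq_add_one]
      rw [hgetD _ _ hj1']
      have e2 : (r ++ rest').getD (j + 1 - 1) (0,0) = (r ++ rest')[j]'hjr' := by
        rw [Nat.add_sub_cancel, hgetD _ _ hjr']
      rw [e2, List.getElem_append_left hj1, List.getElem_append_left hjr]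
      have := hch j (by omega)
      simp [this]
    rw [hnone]
    simp
  have part2 : ∀ k ∈ List.range rest'.length,
      pvRunBreak (r ++ rest') (r.length + k) = pvRunBreak rest' k := by
    intro k hk
    have hkn : k < rest'.length := List.mem_range.mp hk
    match k with
    | 0 =>
      have hL : r.length + 0 < (r ++ rest').length := by simp; omega
      have hL1 : r.length + 0 - 1 < (r ++ rest').length := by simp; omega
      have e1 : (r ++ rest').getD (r.length + 0) (0,0) = rest'[0]'(by omega) := by
        rw [hgetD _ _ hL]
        rw [List.getElem_append_right (by omega)]
        congr 1
        omega
      have e2 : (r ++ rest').getD (r.length + 0 - 1) (0,0) = r[m]'(by omega) := by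
        rw [hgetD _ _ hL1]
        rw [List.getElem_append_left (by omega)]
        congr 1
        omega
      have hy := hb (rest'[0]'(by omega)) (by
        rw [List.head?_eq_getElem?, List.getElem?_eq_getElem (by omega)]
        rfl)
      have hlast : r.getLast? = r[m]? := by
        rw [List.getLast?_eq_getElem?]
        congr 1
        omega
      rw [List.getElem?_eq_getElem (by omega)] at hlast
      rw [hlast, Option.getD_some] at hy
      simp only [pvRunBreak, e1, e2]
      have hL0 : (r.length + 0 == 0) = false := by simp [hm]
      rw [hL0]
      simp [hy]
    | j + 1 =>
      have h1 : r.length + (j+1) < (r ++ rest').length := by simp; omega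
      have h2 : r.length + (j+1) - 1 < (r ++ rest').length := by simp; omega
      have e1 : (r ++ rest').getD (r.length + (j+1)) (0,0) = rest'.getD (j+1) (0,0) := by
        rw [hgetD _ _ h1, hgetD _ _ (show j + 1 < rest'.length by omega)]
        rw [List.getElem_append_right (by omega)]
        congr 1
        omega
      have e2 : (r ++ rest').getD (r.length + (j+1) - 1) (0,0) = rest'.getD j (0,0) := by
        rw [hgetD _ _ h2, hgetD _ _ (show j < rest'.length by omega)]
        rw [List.getElem_append_right (by omega)]
        congr 1
        omega
      simp only [pvRunBreak, e1, e2]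
      have hL : (r.length + (j+1) == 0) = false := by simp
      rw [hL]
      simp
  rw [part1, List.filter_congr (by intro k hk; exact part2 k hk)]
  simp

theorem runsFromCuts_eq_runsOf (peaks : List (Int × Int)) :
    runsFromCuts peaks = runsOf peaks := by
  induction peaks using runsOf.induct with
  | case1 => simp [runsFromCuts, cutsNat, runsOf]
  | case2 p rest ih =>
    obtain ⟨r, rest', hr1, hr2⟩ :
        ∃ r rest', (pvTakeRun [p] rest).1 = r ∧ (pvTakeRun [p] rest).2 = rest' :=
      ⟨_, _, rfl, rfl⟩
    have hsplit : r ++ rest' = p :: rest := by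
      rw [← hr1, ← hr2]; simpa using pvTakeRun_append [p] rest
    have hrne : r ≠ [] := hr1 ▸ pvTakeRun_fst_ne_nil [p] rest (by simp)
    have hchain : List.IsChain (fun a b : Int × Int => b.1 = a.1 + 1) r :=
      hr1 ▸ pvTakeRun_chain [p] rest (by simp) (by simp)
    have hbnd : ∀ q ∈ rest'.head?, q.1 ≠ ((r.getLast?).getD (0, 0)).1 + 1 := by
      rw [← hr1, ← hr2]; exact pvTakeRun_boundary [p] rest (by simp)
    rw [hr2] at ih
    rw [runsOf, hr1, hr2, ← hsplit, ← ih]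
    unfold runsFromCuts
    rw [cutsNat_split r rest' hrne hchain hbnd]
    have hpt : ∀ cd : Nat × Nat,
        ((r ++ rest').drop (r.length + cd.1)).take ((r.length + cd.2) - (r.length + cd.1))
          = (rest'.drop cd.1).take (cd.2 - cd.1) := by
      intro cd
      rw [List.drop_append, List.drop_of_length_le (by omega), Nat.add_sub_cancel_left,
        Nat.add_sub_add_left]
      simp
    cases rest' with
    | nil =>
      simp [cutsNat]
    | cons y tl =>
      obtain ⟨ctl, hcz⟩ := cutsNat_cons_zero (y :: tl) (by simp)
      rw [hcz]
      simp only [List.map_cons, List.tail_cons, List.length_append, Nat.add_zero,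
        List.cons_append, List.zip_cons_cons, List.map_cons]
      congr 1
      · simp only [Nat.sub_zero, List.drop_zero]
        exact List.take_left
      · have hmapend : (ctl.map (fun c => r.length + c)) ++ [r.length + (y :: tl).length]
            = (ctl ++ [(y :: tl).length]).map (fun c => r.length + c) := by simp
        have hhead : r.length :: (ctl.map (fun c => r.length + c))
            = (0 :: ctl).map (fun c => r.length + c) := by simp
        rw [hmapend, hhead, List.zip_map, List.map_map]
        have hmc : ((0 :: ctl).zip (ctl ++ [(y :: tl).length])).map
            ((fun cd : Nat × Nat => ((r ++ y :: tl).drop cd.1).take (cd.2 - cd.1)) ∘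
              Prod.map (fun c => r.length + c) (fun c => r.length + c))
            = ((0 :: ctl).zip (ctl ++ [(y :: tl).length])).map
                (fun cd : Nat × Nat => ((y :: tl).drop cd.1).take (cd.2 - cd.1)) := by
          apply List.map_congr_left
          intro cd _
          exact hpt cd
        rw [hmc]

-- B port = filter of max over the run decomposition
theorem alt_eq (peaks : List (Int × Int)) :
    cluster_peaks_alt peaks
      = ((runsOf peaks).map pymaxAmpl).filter (fun t => t.1 != 0) := by
  rw [← runsFromCuts_eq_runsOf]
  unfold cluster_peaks_alt
  have hcuts : (PySem.List.pyRange 0 (peaks.length : Int)).filter (fun i =>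
        (i == 0) || ((PySem.List.pyGetD peaks i (0, 0)).1 !=
                     (PySem.List.pyGetD peaks (i - 1) (0, 0)).1 + 1))
      = (cutsNat peaks).map (fun (k : Nat) => (k : Int)) := by
    rw [PySem.List.pyRange_zero_nat, List.filter_map]
    unfold cutsNat
    refine congrArg (List.map (fun (k : Nat) => (k : Int))) ?_
    apply List.filter_congr
    intro k _
    match k with
    | 0 => simp [pvRunBreak]
    | j + 1 =>
      have hc1 : ((j + 1 : Nat) : Int) - 1 = (j : Int) := by push_cast; ring
      simp only [Function.comp_apply, hc1, PySem.List.pyGetD_natCast, pvRunBreak]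
      have hz : (((j + 1 : Nat) : Int) == 0) = false := by
        simp only [beq_eq_false_iff_ne, ne_eq]
        push_cast
        omega
      have hz' : ((j + 1 : Nat) == 0) = false := by simp
      rw [hz, hz']
      simp
  simp only [hcuts, PySem.List.slice_from_one]
  rw [← List.map_tail]
  have hend : ((cutsNat peaks).tail.map (fun (k : Nat) => (k : Int))) ++ [(peaks.length : Int)]
      = ((cutsNat peaks).tail ++ [peaks.length]).map (fun (k : Nat) => (k : Int)) := by simp
  rw [hend, List.zip_map, List.map_map, List.map_map]
  unfold runsFromCuts
  rw [List.map_map]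
  refine congrArg _ (List.map_congr_left ?_)
  intro cd _
  obtain ⟨a, b⟩ := cd
  simp only [Function.comp_apply, Prod.map_apply]
  rw [PySem.List.slice_natCast]

-- A port = the same thing
theorem foldl_stepA_eq (rest : List (Int × Int)) :
    ∀ (run all : List (Int × Int)), run ≠ [] →
      flushA (rest.foldl stepA (all, run)) =
        all ++ (pymaxAmpl (pvTakeRun run rest).1 ::
                (runsOf (pvTakeRun run rest).2).map pymaxAmpl) := by
  induction rest with
  | nil =>
    intro run all h
    simp [flushA, pvTakeRun, runsOf, List.length_pos_iff.mpr h]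
  | cons q rest' ih =>
    intro run all h
    have hlen : run.length > 0 := List.length_pos_iff.mpr h
    have hcond : ((run.getLast?.getD (0, 0)).1 == q.1 - 1)
        = (q.1 == (run.getLast?.getD (0, 0)).1 + 1) := by
      rcases Decidable.em (q.1 = (run.getLast?.getD (0, 0)).1 + 1) with he | he
      · rw [beq_iff_eq.mpr (by omega), beq_iff_eq.mpr he]
      · rw [beq_eq_false_iff_ne.mpr (by omega), beq_eq_false_iff_ne.mpr he]
    by_cases hq : q.1 = (run.getLast?.getD (0, 0)).1 + 1
    · have hstep : stepA (all, run) q = (all, run ++ [q]) := by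
        simp [stepA, hq]
      have htake : pvTakeRun run (q :: rest') = pvTakeRun (run ++ [q]) rest' := by
        simp [pvTakeRun, hq]
      rw [List.foldl_cons, hstep, htake, ih (run ++ [q]) all (by simp)]
    · have hstep : stepA (all, run) q = (all ++ [pymaxAmpl run], [q]) := by
        simp [stepA, hcond, hq]
        exact h
      have htake : pvTakeRun run (q :: rest') = (run, q :: rest') := by
        simp [pvTakeRun, hq]
      rw [List.foldl_cons, hstep, ih [q] (all ++ [pymaxAmpl run]) (by simp), htake]
      simp [runsOf]

theorem a_eq (peaks : List (Int × Int)) :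
    cluster_peaks peaks
      = ((runsOf peaks).map pymaxAmpl).filter (fun t => t.1 != 0) := by
  match peaks with
  | [] => simp [cluster_peaks, runsOf]
  | p :: rest =>
    have h0 : stepA ([], []) p = ([], [p]) := by simp [stepA]
    simp only [cluster_peaks, List.length_cons, List.foldl_cons, h0]
    rw [foldl_stepA_eq rest [p] [] (by simp)]
    simp [runsOf]

-- ===== VERDICT (by name: the statement is the Claim_ definition above) =====
theorem cluster_peaks_spec : Claim_equal_cluster_peaks := by
  intro peaks _
  unfold Spec_cluster_peaks
  rw [a_eq, alt_eq]
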